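-- pv_equiv track=rewrite | github.com/Aaryan-Thusoo/exoplanet_CNN_classifier | functions/model_analysis_functions.py | get_all_incorrect
-- ===== SOURCE A (Python) =====
-- def get_all_incorrect(all_preds, all_true, lc_types):
--     incorrect = []
--
--     for i in range(0, len(all_preds)):
--         if all_preds[i] != all_true[i]:
--             incorrect.append((i, int(all_preds[i]), int(all_true[i])))
--
--     incorrect_ordered = []
--
--     for lc_type in lc_types:
--         type_incorrect = []
--         for i in range(0, len(incorrect)):
--             if incorrect[i][2] == lc_type:
--                 type_incorrect.append(incorrect[i])
--
--         incorrect_ordered.append(type_incorrect)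
--
--     return incorrect_ordered
-- ===== SOURCE B (Python) =====
-- def get_all_incorrect(all_preds, all_true, lc_types):
--     buckets = {}
--     for i, (p, t) in enumerate(zip(all_preds, all_true)):
--         if p != t:
--             buckets.setdefault(t, []).append((i, int(p), int(t)))
--     return [list(buckets.get(lc_type, [])) for lc_type in lc_types]
-- ===== Notes on version B (the rewrite author's own statement) =====
-- stated objective: faster
-- what changed: replaces the per-type rescan of the misclassified list (one full pass per lc_type) with a single pass that buckets incorrect entries into a dict keyed by true label, then emits one bucket lookup per lc_type
import Mathlib
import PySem

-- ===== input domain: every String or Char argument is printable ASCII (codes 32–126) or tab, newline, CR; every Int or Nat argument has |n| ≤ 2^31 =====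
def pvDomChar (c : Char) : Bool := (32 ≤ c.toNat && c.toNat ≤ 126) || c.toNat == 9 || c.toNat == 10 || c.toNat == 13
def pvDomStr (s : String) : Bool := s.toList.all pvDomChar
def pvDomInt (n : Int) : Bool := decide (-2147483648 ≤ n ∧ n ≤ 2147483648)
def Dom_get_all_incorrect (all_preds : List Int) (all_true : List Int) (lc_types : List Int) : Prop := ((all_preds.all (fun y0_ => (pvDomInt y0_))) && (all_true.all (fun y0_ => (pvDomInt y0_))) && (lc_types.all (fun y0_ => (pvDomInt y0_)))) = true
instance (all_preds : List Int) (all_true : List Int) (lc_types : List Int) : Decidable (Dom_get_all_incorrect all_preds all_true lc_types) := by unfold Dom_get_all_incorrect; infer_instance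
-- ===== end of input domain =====

-- B groups the misclassified entries in ONE pass into a dict keyed by the true label, instead of
-- rescanning the whole misclassified list once per lc_type (asymptotically faster, O(n+T) vs O(n*T)).

-- ===== PORT A =====
-- Python A: first loop collects (i, pred, true) for mismatching indices; second loop rescans that
-- list once per lc_type. all_preds[i]/all_true[i] are in-range reads under Pre_ (pyGetD default never used there).
def get_all_incorrect (all_preds : List Int) (all_true : List Int) (lc_types : List Int) : List (List (Int × Int × Int)) :=
  let incorrect : List (Int × Int × Int) :=
    (PySem.List.pyRange 0 (all_preds.length : Int) 1).foldl (fun acc i =>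
      if PySem.List.pyGetD all_preds i 0 ≠ PySem.List.pyGetD all_true i 0 then
        acc ++ [(i, PySem.List.pyGetD all_preds i 0, PySem.List.pyGetD all_true i 0)]
      else acc) []
  lc_types.foldl (fun acc lc_type =>
    acc ++ [incorrect.foldl (fun ti x => if x.2.2 = lc_type then ti ++ [x] else ti) []]) []

-- ===== PORT B =====
-- Python B: one pass over enumerate(zip(all_preds, all_true)) bucketing into a dict, then one lookup per lc_type.
def get_all_incorrect_alt (all_preds : List Int) (all_true : List Int) (lc_types : List Int) : List (List (Int × Int × Int)) :=
  let buckets : PySem.Dict Int (List (Int × Int × Int)) :=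
    (PySem.List.enumerate (all_preds.zip all_true) 0).foldl (fun d x =>
      if x.2.1 ≠ x.2.2 then
        d.insert x.2.2 (d.getD x.2.2 [] ++ [(x.1, x.2.1, x.2.2)])
      else d) PySem.Dict.empty
  lc_types.map (fun lc_type => buckets.getD lc_type [])

-- ===== PRECONDITION & SPEC =====
-- Pre_ excludes exactly the inputs where Python A raises IndexError reading all_true[i].
def Pre_get_all_incorrect (all_preds : List Int) (all_true : List Int) (lc_types : List Int) : Prop :=
  all_preds.length ≤ all_true.length
instance (all_preds : List Int) (all_true : List Int) (lc_types : List Int) : Decidable (Pre_get_all_incorrect all_preds all_true lc_types) := by unfold Pre_get_all_incorrect; infer_instance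
def pvWitness_get_all_incorrect : List Int × List Int × List Int := ([1, 2, 3], [1, 0, 3], [0, 3])

def Spec_get_all_incorrect (all_preds : List Int) (all_true : List Int) (lc_types : List Int) (out : List (List (Int × Int × Int))) : Prop := out = get_all_incorrect_alt all_preds all_true lc_types
instance (all_preds : List Int) (all_true : List Int) (lc_types : List Int) (out : List (List (Int × Int × Int))) : Decidable (Spec_get_all_incorrect all_preds all_true lc_types out) := by unfold Spec_get_all_incorrect; infer_instance

-- ===== CLAIM (what is proved, stated in full; the proofs are below) =====
def Claim_equal_get_all_incorrect : Prop := ∀ (all_preds : List Int) (all_true : List Int) (lc_types : List Int), Dom_get_all_incorrect all_preds all_true lc_types → Pre_get_all_incorrect all_preds all_true lc_types → Spec_get_all_incorrect all_preds all_true lc_types (get_all_incorrect all_preds all_true lc_types)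
-- ===== LEMMAS AND PROOFS =====

-- The dict built by B's bucketing fold, looked up at lc, is the filter A's inner rescan computes.
theorem bucketD (l : List (Int × Int × Int)) (d : PySem.Dict Int (List (Int × Int × Int))) (lc : Int) :
    (l.foldl (fun d x =>
      if x.2.1 ≠ x.2.2 then d.insert x.2.2 (d.getD x.2.2 [] ++ [(x.1, x.2.1, x.2.2)]) else d) d).getD lc []
    = d.getD lc [] ++ l.filter (fun x => decide (x.2.1 ≠ x.2.2) && decide (x.2.2 = lc)) := by
  induction l generalizing d with
  | nil => simp
  | cons y ys ih =>
    simp only [List.foldl_cons, List.filter_cons]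
    by_cases hne : y.2.1 ≠ y.2.2
    · rw [if_pos hne, ih, PySem.Dict.getD_insert]
      by_cases hlc : lc = y.2.2
      · subst hlc; simp [hne]
      · simp [hne, hlc, Ne.symm hlc]
    · rw [if_neg hne, ih]
      simp [hne]

-- ===== VERDICT (by name: the statement is the Claim_ definition above) =====
theorem get_all_incorrect_spec : Claim_equal_get_all_incorrect := by
  intro ap at_ lt _ hpre
  unfold Pre_get_all_incorrect at hpre
  unfold Spec_get_all_incorrect
  simp only [get_all_incorrect, get_all_incorrect_alt]
  have hzlen : (ap.zip at_).length = ap.length := by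
    rw [List.length_zip]; omega
  -- the values zipped by B are exactly the values A indexes
  have hzip : ∀ i ∈ PySem.List.pyRange 0 (ap.length : Int) 1,
      PySem.List.pyGetD (ap.zip at_) i ((0 : Int), (0 : Int))
        = (PySem.List.pyGetD ap i 0, PySem.List.pyGetD at_ i 0) := by
    intro i hi
    obtain ⟨h0, hn⟩ := (PySem.List.mem_pyRange_one).mp hi
    have hi' : i.toNat < ap.length := by omega
    rw [PySem.List.pyGetD_eq_getElem _ _ h0 (by omega),
        PySem.List.pyGetD_eq_getElem _ _ h0 (by exact_mod_cast hn),
        PySem.List.pyGetD_eq_getElem _ _ h0 (by omega)]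
    exact List.getElem_zip
  -- both outer loops become maps over lc_types
  rw [PySem.List.foldl_append_singleton_eq_map]
  simp only [List.nil_append]
  apply List.map_congr_left
  intro lc _
  -- A's inner rescan is a filter of the misclassified list; B's answer is the bucket at lc
  rw [PySem.List.foldl_append_ite_eq_filter, bucketD]
  simp only [pysem, List.nil_append]
  rw [PySem.List.enumerate_eq_map_pyRange (ap.zip at_) ((0 : Int), (0 : Int)),
      show PySem.List.len (ap.zip at_) = (ap.length : Int) by simp [PySem.List.len, hzlen]]
  -- B zips the same values A indexes, so both sides are a filtered map over the same index range
  have hmap : (PySem.List.pyRange 0 (ap.length : Int)).map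
        (fun j => (j, PySem.List.pyGetD (ap.zip at_) j ((0 : Int), (0 : Int))))
      = (PySem.List.pyRange 0 (ap.length : Int)).map
        (fun j => (j, PySem.List.pyGetD ap j 0, PySem.List.pyGetD at_ j 0)) :=
    List.map_congr_left (fun j hj => by rw [hzip j hj])
  rw [hmap]
  simp only [List.filter_map, List.filter_filter, Function.comp]
  refine congrArg (List.map _) (List.filter_congr ?_)
  intro i hi
  simp [Bool.and_comm]
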